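-- pv_equiv track=rewrite | github.com/slaclab/lume-genesis | genesis/version4/input/manual.py | _to_class_name
-- ===== SOURCE A (Python) =====
-- renames = {
--     "l": "L",
--     "lambda": "lambda_",
--     # Mapping to common bmad names:
--     "dx": "x_offset",
--     "dy": "y_offset",
--     "Phaseshifter": "PhaseShifter",
--     "Importdistribution": "ImportDistribution",
--     "Importbeam": "ImportBeam",
--     "Importfield": "ImportField",
--     "Importtransformation": "ImportTransformation",
--     "SequenceFilelist": "SequenceFilelist",
-- }
--
-- def _to_class_name(genesis_name: str) -> str:
--     """Convert a Genesis 4 manual name to a dataclass name."""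
--     name_chars = list(genesis_name.capitalize())
--     while "_" in name_chars:
--         idx = name_chars.index("_")
--         name_chars.pop(idx)
--         if idx < len(name_chars):
--             name_chars[idx] = name_chars[idx].upper()
--     class_name = "".join(name_chars)
--     return renames.get(class_name, class_name)
-- ===== SOURCE B (Python) =====
-- renames = {
--     "l": "L",
--     "lambda": "lambda_",
--     # Mapping to common bmad names:
--     "dx": "x_offset",
--     "dy": "y_offset",
--     "Phaseshifter": "PhaseShifter",
--     "Importdistribution": "ImportDistribution",
--     "Importbeam": "ImportBeam",
--     "Importfield": "ImportField",
--     "Importtransformation": "ImportTransformation",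
--     "SequenceFilelist": "SequenceFilelist",
-- }
--
-- def _to_class_name(genesis_name: str) -> str:
--     """Convert a Genesis 4 manual name to a dataclass name."""
--     out = []
--     upper_next = False
--     for c in genesis_name.capitalize():
--         if c == "_":
--             upper_next = True
--         elif upper_next:
--             out.append(c.upper())
--             upper_next = False
--         else:
--             out.append(c)
--     class_name = "".join(out)
--     return renames.get(class_name, class_name)
-- ===== Notes on version B (the rewrite author's own statement) =====
-- stated objective: simpler
-- what changed: Replaces the repeated index/pop/mutate while-loop over the char list by a single left-to-right pass that carries a boolean flag marking that the next emitted char must be uppercased.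
import Mathlib
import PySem

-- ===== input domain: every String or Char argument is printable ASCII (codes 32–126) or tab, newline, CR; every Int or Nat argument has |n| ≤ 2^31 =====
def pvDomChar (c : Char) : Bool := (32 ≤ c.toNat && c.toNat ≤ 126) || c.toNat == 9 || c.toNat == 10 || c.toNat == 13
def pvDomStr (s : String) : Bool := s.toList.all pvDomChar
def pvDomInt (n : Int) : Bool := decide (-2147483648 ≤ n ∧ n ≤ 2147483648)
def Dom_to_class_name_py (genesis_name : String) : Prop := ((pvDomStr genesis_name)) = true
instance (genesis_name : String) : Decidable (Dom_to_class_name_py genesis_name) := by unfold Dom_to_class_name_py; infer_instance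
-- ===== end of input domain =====

-- B replaces A's repeated index/pop/mutate while-loop by one left-to-right pass carrying an
-- uppercase-next flag (objective: simpler).

-- ===== PORT A =====
-- module-level 'renames' dict, shared by both Pythons
def renamesDict : PySem.Dict String String :=
  PySem.Dict.ofList
    [("l", "L"), ("lambda", "lambda_"), ("dx", "x_offset"), ("dy", "y_offset"),
     ("Phaseshifter", "PhaseShifter"), ("Importdistribution", "ImportDistribution"),
     ("Importbeam", "ImportBeam"), ("Importfield", "ImportField"),
     ("Importtransformation", "ImportTransformation"), ("SequenceFilelist", "SequenceFilelist")]

-- str.capitalize(): first char titlecased, rest lowercased; exact on the ASCII domain,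
-- where Python's titlecase of one char = upperChar.
def pyCapitalize (cs : List Char) : List Char :=
  match cs with
  | [] => []
  | c :: rest => PySem.Chars.upperChar c :: rest.map PySem.Chars.lowerChar

-- (Char.ofNat n).toNat = n for a valid scalar value
theorem toNat_ofNat_valid (n : Nat) (h : n.isValidChar) : (Char.ofNat n).toNat = n := by
  simp only [Char.ofNat, dif_pos h, Char.ofNatAux]
  exact Nat.add_zero n

-- uppercasing a char neither creates nor destroys '_'
theorem upperChar_eq_underscore_iff (c : Char) :
    PySem.Chars.upperChar c = '_' ↔ c = '_' := by
  unfold PySem.Chars.upperChar PySem.Chars.islower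
  split_ifs with h
  · simp only [Bool.and_eq_true, decide_eq_true_eq, Char.le_def,
      UInt32.le_iff_toNat_le] at h
    have h1 : 97 ≤ c.toNat := h.1
    have h2 : c.toNat ≤ 122 := h.2
    constructor
    · intro he
      exfalso
      have hv : (c.toNat - 32).isValidChar := Or.inl (by omega)
      have := congrArg Char.toNat he
      rw [toNat_ofNat_valid _ hv] at this
      have h95 : ('_' : Char).toNat = 95 := by decide
      omega
    · intro he
      subst he
      exact absurd h1 (by decide)
  · exact Iff.rfl

-- the first '_' splits the list as pre ++ '_' :: suf with '_'-free pre
theorem index?_underscore_split (cs : List Char) (idx : Nat)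
    (h : PySem.List.index? cs '_' = some idx) :
    ∃ pre suf, cs = pre ++ '_' :: suf ∧ pre.length = idx ∧ '_' ∉ pre := by
  exact (PySem.List.index?_eq_some_iff _ _ _).1 h

theorem eraseIdx_append_cons {α : Type} (pre suf : List α) (x : α) :
    (pre ++ x :: suf).eraseIdx pre.length = pre ++ suf := by
  induction pre with
  | nil => simp
  | cons a t ih => simp [ih]

theorem set_append_cons {α : Type} (pre suf : List α) (x v : α) :
    (pre ++ x :: suf).set pre.length v = pre ++ v :: suf := by
  induction pre with
  | nil => simp
  | cons a t ih => simp [ih]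

-- the count of '_' strictly drops in each iteration of A's while-loop
theorem count_lt_of_index?_some (cs : List Char) (idx : Nat)
    (h : PySem.List.index? cs '_' = some idx) :
    (List.count '_' (if hlt : idx < (cs.eraseIdx idx).length then
        (cs.eraseIdx idx).set idx (PySem.Chars.upperChar (cs.eraseIdx idx)[idx])
      else cs.eraseIdx idx)) < List.count '_' cs := by
  obtain ⟨pre, suf, rfl, rfl, hpre⟩ := index?_underscore_split cs idx h
  have hz : List.count '_' pre = 0 := List.count_eq_zero_of_not_mem hpre
  rw [eraseIdx_append_cons]
  split_ifs with hlt
  · cases suf with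
    | nil => simp at hlt
    | cons d suf2 =>
      have hget : (pre ++ d :: suf2)[pre.length] = d := List.getElem_of_append rfl rfl
      rw [hget, set_append_cons]
      by_cases hd : d = '_'
      · subst hd
        simp only [(upperChar_eq_underscore_iff '_').2 rfl]
        simp [List.count_append, hz]
      · have hU : PySem.Chars.upperChar d ≠ '_' := fun he => hd ((upperChar_eq_underscore_iff d).1 he)
        simp [List.count_append, hz, hd, hU]
  · simp [List.count_append, hz]

-- the while-loop of A: find first '_', pop it, uppercase the char now at that index
def loopA (cs : List Char) : List Char :=
  match h : PySem.List.index? cs '_' with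
  | none => cs
  | some idx =>
    -- name_chars.pop(idx): idx (= index of '_') is in range, so pop = eraseIdx
    let cs' := cs.eraseIdx idx
    if hlt : idx < cs'.length then loopA (cs'.set idx (PySem.Chars.upperChar cs'[idx]))
    else loopA cs'
termination_by List.count '_' cs
decreasing_by
  · have := count_lt_of_index?_some cs idx h; rwa [dif_pos hlt] at this
  · have := count_lt_of_index?_some cs idx h; rwa [dif_neg hlt] at this

def to_class_name_py (genesis_name : String) : String :=
  let class_name := String.ofList (loopA (pyCapitalize genesis_name.toList))
  PySem.Dict.getD renamesDict class_name class_name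

-- ===== PORT B =====
def to_class_name_py_alt (genesis_name : String) : String :=
  let r := (pyCapitalize genesis_name.toList).foldl
    (fun (st : List Char × Bool) c =>
      if c = '_' then (st.1, true)
      else if st.2 then (st.1 ++ [PySem.Chars.upperChar c], false)
      else (st.1 ++ [c], false)) ([], false)
  let class_name := String.ofList r.1
  PySem.Dict.getD renamesDict class_name class_name

-- ===== PRECONDITION & SPEC =====
def Spec_to_class_name_py (genesis_name : String) (out : String) : Prop := out = to_class_name_py_alt genesis_name
instance (genesis_name : String) (out : String) : Decidable (Spec_to_class_name_py genesis_name out) := by unfold Spec_to_class_name_py; infer_instance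

-- ===== CLAIM (what is proved, stated in full; the proofs are below) =====
def Claim_equal_to_class_name_py : Prop := ∀ (genesis_name : String), Dom_to_class_name_py genesis_name → Spec_to_class_name_py genesis_name (to_class_name_py genesis_name)

-- ===== LEMMAS AND PROOFS =====

-- reference one-pass: 'scan u cs' = result of the flag pass starting with flag u
def scan : Bool → List Char → List Char
  | _, [] => []
  | u, c :: r => if c = '_' then scan true r else (if u then PySem.Chars.upperChar c else c) :: scan false r

theorem scan_no_underscore (cs : List Char) (h : '_' ∉ cs) : scan false cs = cs := by
  induction cs with
  | nil => rfl
  | cons c r ih =>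
    simp only [List.mem_cons, not_or] at h
    simp [scan, Ne.symm h.1, ih h.2]

theorem scan_append_no_underscore (pre cs : List Char) (h : '_' ∉ pre) :
    scan false (pre ++ cs) = pre ++ scan false cs := by
  induction pre with
  | nil => rfl
  | cons c r ih =>
    simp only [List.mem_cons, not_or] at h
    simp [scan, Ne.symm h.1, ih h.2]

theorem loopA_eq_scan (cs : List Char) : loopA cs = scan false cs := by
  induction cs using loopA.induct with
  | case1 cs h =>
    rw [loopA.eq_def]
    split
    next => exact (scan_no_underscore cs ((PySem.List.index?_eq_none_iff _ _).1 h)).symm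
    next idx2 h2 => rw [h] at h2; cases h2
  | case2 cs idx h cs' hlt ih =>
    rw [loopA.eq_def]
    split
    next h2 => rw [h] at h2; cases h2
    next idx2 h2 =>
    rw [h] at h2
    cases h2
    rw [dif_pos hlt]
    obtain ⟨pre, suf, rfl, rfl, hpre⟩ := index?_underscore_split cs idx h
    have e : cs' = pre ++ suf := eraseIdx_append_cons _ _ _
    simp only [e] at hlt ih
    cases suf with
    | nil => simp at hlt
    | cons d suf2 =>
      have hget : (pre ++ d :: suf2)[pre.length]'(by simpa using hlt) = d :=
        List.getElem_of_append rfl rfl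
      simp only [eraseIdx_append_cons, hget, set_append_cons] at ih ⊢
      rw [ih]
      by_cases hd : d = '_'
      · subst hd
        simp [scan_append_no_underscore _ _ hpre, scan, (upperChar_eq_underscore_iff '_').2 rfl]
      · have hU : PySem.Chars.upperChar d ≠ '_' := fun he => hd ((upperChar_eq_underscore_iff d).1 he)
        simp [scan_append_no_underscore _ _ hpre, scan, hd, hU]
  | case3 cs idx h cs' hlt ih =>
    rw [loopA.eq_def]
    split
    next h2 => rw [h] at h2; cases h2
    next idx2 h2 =>
    rw [h] at h2
    cases h2
    rw [dif_neg hlt, ih]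
    obtain ⟨pre, suf, rfl, rfl, hpre⟩ := index?_underscore_split cs idx h
    have e : cs' = pre ++ suf := eraseIdx_append_cons _ _ _
    simp only [e] at hlt ⊢
    cases suf with
    | cons d suf2 => simp at hlt
    | nil => simp [scan_append_no_underscore _ _ hpre, scan, scan_no_underscore pre hpre]

theorem foldl_eq_scan (cs : List Char) (u : Bool) (acc : List Char) :
    (cs.foldl (fun (st : List Char × Bool) c =>
      if c = '_' then (st.1, true)
      else if st.2 then (st.1 ++ [PySem.Chars.upperChar c], false)
      else (st.1 ++ [c], false)) (acc, u)).1 = acc ++ scan u cs := by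
  induction cs generalizing u acc with
  | nil => simp [scan]
  | cons c r ih =>
    by_cases hc : c = '_'
    · subst hc; simp [scan, ih]
    · cases u <;> simp [scan, hc, ih]

-- ===== VERDICT (by name: the statement is the Claim_ definition above) =====
theorem to_class_name_py_spec : Claim_equal_to_class_name_py := by
  intro s _
  simp only [Spec_to_class_name_py, to_class_name_py, to_class_name_py_alt,
    loopA_eq_scan, foldl_eq_scan, List.nil_append]
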